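-- pv_equiv track=rewrite | github.com/adityashirsatrao007/Leetcode | 2368-SumOfTotalStrengthOfWizards/2368-SumOfTotalStrengthOfWizards.py | totalStrength
-- ===== SOURCE A (Python) =====
-- def totalStrength(strength):
--     """
--     :type strength: List[int]
--     :rtype: int
--     """
--     MOD = 10**9 + 7
--     n = len(strength)
--
--     # Calculate prefix sums
--     prefix = [0] * (n + 1)
--     for i in range(n):
--         prefix[i + 1] = (prefix[i] + strength[i]) % MOD
--
--     # Calculate prefix of prefix sums
--     prefix_of_prefix = [0] * (n + 2)
--     for i in range(n + 1):
--         prefix_of_prefix[i + 1] = (prefix_of_prefix[i] + prefix[i]) % MOD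
--
--     # Monotonic stack to find left and right boundaries
--     left = [-1] * n
--     right = [n] * n
--     stack = []
--
--     for i in range(n):
--         while stack and strength[stack[-1]] > strength[i]:
--             right[stack.pop()] = i
--         stack.append(i)
--
--     stack = []
--
--     for i in range(n - 1, -1, -1):
--         while stack and strength[stack[-1]] >= strength[i]:
--             left[stack.pop()] = i
--         stack.append(i)
--
--     # Calculate total strength
--     total = 0
--     for i in range(n):
--         l = left[i]
--         r = right[i]
--         left_sum = (prefix_of_prefix[i + 1] - prefix_of_prefix[l + 1]) % MOD
--         right_sum = (prefix_of_prefix[r + 1] - prefix_of_prefix[i + 1]) % MOD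
--         total += strength[i] * (right_sum * (i - l) - left_sum * (r - i)) % MOD
--         total %= MOD
--
--     return total
-- ===== SOURCE B (Python) =====
-- def totalStrength(strength):
--     """
--     :type strength: List[int]
--     :rtype: int
--     """
--     MOD = 10**9 + 7
--     n = len(strength)
--
--     # prefix-of-prefix sums, built in one fused pass
--     pp = [0]
--     pre = 0
--     for x in strength:
--         pp.append((pp[-1] + pre) % MOD)
--         pre = (pre + x) % MOD
--     pp.append((pp[-1] + pre) % MOD)
--
--     total = 0
--     for i in range(n):
--         x = strength[i]
--         # nearest index to the left with value <= x (direct scan)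
--         l = i - 1
--         while l >= 0 and strength[l] > x:
--             l -= 1
--         # nearest index to the right with value < x (direct scan)
--         r = i + 1
--         while r < n and strength[r] >= x:
--             r += 1
--         left_sum = (pp[i + 1] - pp[l + 1]) % MOD
--         right_sum = (pp[r + 1] - pp[i + 1]) % MOD
--         total = (total + x * ((right_sum * (i - l) - left_sum * (r - i)) % MOD)) % MOD
--     return total
-- ===== Notes on version B (the rewrite author's own statement) =====
-- stated objective: simpler
-- what changed: Replaces the two monotonic-stack passes and the left/right boundary arrays with direct per-element boundary scans, and fuses the prefix and prefix-of-prefix arrays into one running pass.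
import Mathlib
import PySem

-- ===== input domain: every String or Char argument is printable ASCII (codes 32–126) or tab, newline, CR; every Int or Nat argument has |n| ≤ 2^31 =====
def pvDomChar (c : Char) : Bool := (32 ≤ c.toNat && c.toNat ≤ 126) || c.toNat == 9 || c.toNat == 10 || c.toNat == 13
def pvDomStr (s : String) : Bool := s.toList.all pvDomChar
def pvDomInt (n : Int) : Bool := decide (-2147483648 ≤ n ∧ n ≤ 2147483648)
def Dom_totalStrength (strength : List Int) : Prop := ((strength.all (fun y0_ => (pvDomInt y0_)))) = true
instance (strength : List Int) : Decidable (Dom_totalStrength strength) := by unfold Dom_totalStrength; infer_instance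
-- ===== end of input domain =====

-- B replaces A's two monotonic-stack passes by direct per-element boundary scans and fuses the
-- prefix / prefix-of-prefix arrays into one running pass (objective: simpler; not faster).

def pvM : Int := 1000000007

-- ===== PORT A =====
-- prefix[i+1] = (prefix[i] + strength[i]) % MOD, filled into a [0]*(n+1) array
def aPrefix (s : List Int) : List Int :=
  (List.range s.length).foldl
    (fun p i => p.set (i + 1) (PySem.Int.mod (p.getD i 0 + s.getD i 0) pvM))
    (List.replicate (s.length + 1) 0)

-- prefix_of_prefix[i+1] = (prefix_of_prefix[i] + prefix[i]) % MOD, filled into [0]*(n+2)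
def aPP (s : List Int) (pre : List Int) : List Int :=
  (List.range (s.length + 1)).foldl
    (fun p i => p.set (i + 1) (PySem.Int.mod (p.getD i 0 + pre.getD i 0) pvM))
    (List.replicate (s.length + 2) 0)

-- the inner `while stack and strength[stack[-1]] > strength[i]` loop (stack head = top)
def aPopR (s : List Int) (i : Nat) : List Int → List Nat → List Int × List Nat
  | right, [] => (right, [])
  | right, j :: st =>
    if s.getD j 0 > s.getD i 0 then aPopR s i (right.set j (Int.ofNat i)) st
    else (right, j :: st)

def aRightPass (s : List Int) : List Int × List Nat :=
  (List.range s.length).foldl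
    (fun st i => let p := aPopR s i st.1 st.2; (p.1, i :: p.2))
    (List.replicate s.length (Int.ofNat s.length), [])

-- the inner `while stack and strength[stack[-1]] >= strength[i]` loop of the backward pass
def aPopL (s : List Int) (i : Nat) : List Int → List Nat → List Int × List Nat
  | left, [] => (left, [])
  | left, j :: st =>
    if s.getD j 0 ≥ s.getD i 0 then aPopL s i (left.set j (Int.ofNat i)) st
    else (left, j :: st)

def aLeftPass (s : List Int) : List Int × List Nat :=
  ((List.range s.length).reverse).foldl
    (fun st i => let p := aPopL s i st.1 st.2; (p.1, i :: p.2))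
    (List.replicate s.length (-1), [])

def totalStrength (strength : List Int) : Int :=
  let n := strength.length
  let pre := aPrefix strength
  let pp := aPP strength pre
  let right := (aRightPass strength).1
  let left := (aLeftPass strength).1
  (List.range n).foldl (fun total i =>
    let l := left.getD i 0
    let r := right.getD i 0
    let left_sum := PySem.Int.mod (pp.getD (i + 1) 0 - pp.getD (l + 1).toNat 0) pvM
    let right_sum := PySem.Int.mod (pp.getD (r + 1).toNat 0 - pp.getD (i + 1) 0) pvM
    PySem.Int.mod
      (total + strength.getD i 0 *
        PySem.Int.mod (right_sum * ((i : Int) - l) - left_sum * (r - (i : Int))) pvM)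
      pvM) 0

-- ===== PORT B =====
-- `while l >= 0 and strength[l] > x: l -= 1`, entered with l = i - 1 (argument k = i)
def bScanL (s : List Int) (x : Int) : Nat → Int
  | 0 => -1
  | j + 1 => if s.getD j 0 > x then bScanL s x j else Int.ofNat j

-- `while r < n and strength[r] >= x: r += 1`
def bScanR (s : List Int) (x : Int) (r : Nat) : Nat :=
  if r < s.length then
    if s.getD r 0 ≥ x then bScanR s x (r + 1) else r
  else r
  termination_by s.length - r

-- the fused pp / pre loop plus the final append
def bPP (s : List Int) : List Int :=
  let st := s.foldl
    (fun (st : List Int × Int) x =>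
      (st.1 ++ [PySem.Int.mod ((st.1.getLast?.getD 0) + st.2) pvM], PySem.Int.mod (st.2 + x) pvM))
    ([0], 0)
  st.1 ++ [PySem.Int.mod ((st.1.getLast?.getD 0) + st.2) pvM]

def totalStrength_alt (strength : List Int) : Int :=
  let n := strength.length
  let pp := bPP strength
  (List.range n).foldl (fun total i =>
    let x := strength.getD i 0
    let l := bScanL strength x i
    let r := bScanR strength x (i + 1)
    let left_sum := PySem.Int.mod (pp.getD (i + 1) 0 - pp.getD (l + 1).toNat 0) pvM
    let right_sum := PySem.Int.mod (pp.getD (r + 1) 0 - pp.getD (i + 1) 0) pvM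
    PySem.Int.mod
      (total + x *
        PySem.Int.mod (right_sum * ((i : Int) - l) - left_sum * ((r : Int) - (i : Int))) pvM)
      pvM) 0

-- ===== PRECONDITION & SPEC =====
def Spec_totalStrength (strength : List Int) (out : Int) : Prop := out = totalStrength_alt strength
instance (strength : List Int) (out : Int) : Decidable (Spec_totalStrength strength out) := by unfold Spec_totalStrength; infer_instance

-- ===== CLAIM (what is proved, stated in full; the proofs are below) =====
def Claim_equal_totalStrength : Prop := ∀ (strength : List Int), Dom_totalStrength strength → Spec_totalStrength strength (totalStrength strength)

-- ===== LEMMAS AND PROOFS =====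

-- running (mod M) scan: scanM t a = [a, (a+t0)%M, ((a+t0)%M+t1)%M, …]
def scanM : List Int → Int → List Int
  | [], a => [a]
  | x :: t, a => a :: scanM t (PySem.Int.mod (a + x) pvM)

def lastM : List Int → Int → Int
  | [], a => a
  | x :: t, a => lastM t (PySem.Int.mod (a + x) pvM)

theorem scanM_length (t : List Int) (a : Int) : (scanM t a).length = t.length + 1 := by
  induction t generalizing a with
  | nil => rfl
  | cons x t ih => simp [scanM, ih]

theorem scanM_getD_last (t : List Int) (a : Int) : (scanM t a).getD t.length 0 = lastM t a := by
  induction t generalizing a with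
  | nil => rfl
  | cons x t ih => simpa [scanM, lastM] using ih _

theorem scanM_append (t : List Int) (x a : Int) :
    scanM (t ++ [x]) a = scanM t a ++ [PySem.Int.mod (lastM t a + x) pvM] := by
  induction t generalizing a with
  | nil => rfl
  | cons y t ih => simp [scanM, lastM, ih]

-- the array-fill pattern of A's first two loops computes scanM
theorem getD_append_left (A B : List Int) (i : Nat) (d : Int) (h : i < A.length) :
    (A ++ B).getD i d = A.getD i d := by
  simp [List.getD_eq_getElem?_getD, List.getElem?_append_left h]

theorem fill_aux (v : List Int) (k : Nat) (hk : k ≤ v.length) :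
    (List.range k).foldl
      (fun p i => p.set (i + 1) (PySem.Int.mod (p.getD i 0 + v.getD i 0) pvM))
      (List.replicate (v.length + 1) 0)
    = scanM (v.take k) 0 ++ List.replicate (v.length - k) 0 := by
  induction k with
  | zero =>
    simp [scanM, List.replicate_succ]
  | succ k ih =>
    have hk' : k ≤ v.length := Nat.le_of_succ_le hk
    rw [List.range_succ, List.foldl_append, ih hk']
    have hlen : (scanM (v.take k) 0).length = k + 1 := by
      rw [scanM_length, List.length_take_of_le hk']
    have hgd : (scanM (v.take k) 0 ++ List.replicate (v.length - k) 0).getD k 0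
        = lastM (v.take k) 0 := by
      rw [getD_append_left _ _ _ _ (by omega)]
      have := scanM_getD_last (v.take k) 0
      rwa [List.length_take_of_le hk'] at this
    have htake : v.take (k + 1) = v.take k ++ [v.getD k 0] := by
      rw [List.take_succ]
      congr 1
      have : v[k]? = some v[k] := List.getElem?_eq_getElem (by omega)
      simp [this, List.getD_eq_getElem?_getD]
    have hrep : v.length - k = (v.length - (k + 1)) + 1 := by omega
    simp only [List.foldl_cons, List.foldl_nil, hgd]
    rw [htake, scanM_append]
    rw [List.set_append_right _ _ (by omega)]
    rw [hlen, Nat.sub_self, hrep, List.replicate_succ]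
    simp [List.append_assoc]

theorem fill_eq_scanM (v : List Int) :
    (List.range v.length).foldl
      (fun p i => p.set (i + 1) (PySem.Int.mod (p.getD i 0 + v.getD i 0) pvM))
      (List.replicate (v.length + 1) 0) = scanM v 0 := by
  simpa using fill_aux v v.length le_rfl

theorem aPrefix_eq (s : List Int) : aPrefix s = scanM s 0 := by
  simpa [aPrefix] using fill_eq_scanM s

theorem aPP_eq (s : List Int) : aPP s (scanM s 0) = scanM (scanM s 0) 0 := by
  have h := fill_eq_scanM (scanM s 0)
  simpa [aPP, scanM_length s 0] using h

-- B's fused loop computes the same list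
theorem bPP_aux (t : List Int) :
    ∀ (L : List Int) (b a : Int), L.getLast? = some b →
    (let st := t.foldl
        (fun (st : List Int × Int) x =>
          (st.1 ++ [PySem.Int.mod ((st.1.getLast?.getD 0) + st.2) pvM], PySem.Int.mod (st.2 + x) pvM))
        (L, a);
      st.1 ++ [PySem.Int.mod ((st.1.getLast?.getD 0) + st.2) pvM])
    = L.dropLast ++ scanM (scanM t a) b := by
  induction t with
  | nil =>
    intro L b a h
    have hL : L.dropLast ++ [b] = L := List.dropLast_append_getLast? b h
    simp only [List.foldl_nil, scanM, h]
    rw [← hL]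
    simp
  | cons x t ih =>
    intro L b a h
    have h1 : (L ++ [PySem.Int.mod (b + a) pvM]).getLast? = some (PySem.Int.mod (b + a) pvM) := by
      simp
    have hL : L.dropLast ++ [b] = L := List.dropLast_append_getLast? b h
    simp only [List.foldl_cons, h]
    have := ih (L ++ [PySem.Int.mod (b + a) pvM]) (PySem.Int.mod (b + a) pvM)
      (PySem.Int.mod (a + x) pvM) h1
    simp only [Option.getD_some] at this ⊢
    rw [this]
    simp only [scanM]
    rw [← hL]
    simp [List.append_assoc]

theorem bPP_eq (s : List Int) : bPP s = scanM (scanM s 0) 0 := by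
  have := bPP_aux s [0] 0 0 (by simp)
  simpa [bPP] using this

-- boundary specs
theorem bScanR_ge (s : List Int) (x : Int) (r : Nat) : r ≤ bScanR s x r := by
  fun_induction bScanR s x r <;> omega

theorem bScanR_le (s : List Int) (x : Int) (r : Nat) (h : r ≤ s.length) :
    bScanR s x r ≤ s.length := by
  fun_induction bScanR s x r <;> omega

theorem bScanR_between (s : List Int) (x : Int) (r k : Nat) (h1 : r ≤ k)
    (h2 : k < bScanR s x r) : x ≤ s.getD k 0 := by
  fun_induction bScanR s x r with
  | case1 r hr hx ih =>
    rcases Nat.eq_or_lt_of_le h1 with h | h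
    · exact h ▸ hx
    · exact ih h h2
  | case2 r hr hx => omega
  | case3 r hr => omega

theorem bScanR_stop (s : List Int) (x : Int) (r : Nat) (h : bScanR s x r < s.length) :
    s.getD (bScanR s x r) 0 < x := by
  fun_induction bScanR s x r with
  | case1 r hr hx ih => exact ih h
  | case2 r hr hx => omega
  | case3 r hr => omega

theorem bScanL_lt (s : List Int) (x : Int) (k : Nat) : bScanL s x k < (k : Int) := by
  induction k with
  | zero => simp [bScanL]
  | succ j ih =>
    simp only [bScanL]
    split
    · omega
    · simp

theorem bScanL_ge (s : List Int) (x : Int) (k : Nat) : -1 ≤ bScanL s x k := by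
  induction k with
  | zero => simp [bScanL]
  | succ j ih =>
    simp only [bScanL]
    split
    · exact ih
    · simp

theorem bScanL_between (s : List Int) (x : Int) (k j : Nat) (h1 : j < k)
    (h2 : bScanL s x k < (j : Int)) : x < s.getD j 0 := by
  induction k with
  | zero => omega
  | succ m ih =>
    simp only [bScanL] at h2
    by_cases hv : s.getD m 0 > x
    · rw [if_pos hv] at h2
      rcases Nat.lt_succ_iff_lt_or_eq.mp h1 with h | h
      · exact ih h h2
      · exact h ▸ hv
    · rw [if_neg hv] at h2
      simp at h2
      omega

theorem bScanL_stop (s : List Int) (x : Int) (k : Nat) (h : 0 ≤ bScanL s x k) :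
    s.getD (bScanL s x k).toNat 0 ≤ x := by
  induction k with
  | zero => simp [bScanL] at h
  | succ m ih =>
    simp only [bScanL] at h ⊢
    by_cases hv : s.getD m 0 > x
    · rw [if_pos hv] at h ⊢
      exact ih h
    · rw [if_neg hv]
      simpa using hv

-- abbreviations for the per-index boundaries
def rIdx (s : List Int) (j : Nat) : Nat := bScanR s (s.getD j 0) (j + 1)
def lIdx (s : List Int) (j : Nat) : Int := bScanL s (s.getD j 0) j

theorem getD_set_self (l : List Int) (i : Nat) (v d : Int) (h : i < l.length) :
    (l.set i v).getD i d = v := by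
  simp [List.getD_eq_getElem?_getD, List.getElem?_set, h]

theorem getD_set_ne (l : List Int) (i j : Nat) (v d : Int) (h : j ≠ i) :
    (l.set i v).getD j d = l.getD j d := by
  simp [List.getD_eq_getElem?_getD, List.getElem?_set, Ne.symm h]

theorem rIdx_gt (s : List Int) (j : Nat) : j < rIdx s j :=
  Nat.lt_of_lt_of_le (Nat.lt_succ_self j) (bScanR_ge s (s.getD j 0) (j + 1))

theorem rIdx_le (s : List Int) (j : Nat) (h : j < s.length) : rIdx s j ≤ s.length :=
  bScanR_le s (s.getD j 0) (j + 1) h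

theorem rIdx_eq_iff (s : List Int) (i j : Nat) (hi : i < s.length) (hj : j < i)
    (hge : i ≤ rIdx s j) : s.getD j 0 > s.getD i 0 ↔ rIdx s j = i := by
  constructor
  · intro h
    by_contra hne
    have hlt : i < rIdx s j := lt_of_le_of_ne hge (Ne.symm hne)
    have := bScanR_between s (s.getD j 0) (j + 1) i (by omega) hlt
    omega
  · intro h
    unfold rIdx at h
    have hs : bScanR s (s.getD j 0) (j + 1) < s.length := by omega
    have := bScanR_stop s (s.getD j 0) (j + 1) hs
    rw [h] at this
    omega

theorem aPopR_length (s : List Int) (i : Nat) :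
    ∀ (stk : List Nat) (right : List Int), (aPopR s i right stk).1.length = right.length := by
  intro stk
  induction stk with
  | nil => intro right; rfl
  | cons j st ih =>
    intro right
    simp only [aPopR]
    split
    · rw [ih]; simp
    · rfl

theorem aPopR_spec (s : List Int) (i : Nat) (hi : i < s.length) :
    ∀ (stk : List Nat) (right : List Int),
    (∀ j ∈ stk, j < i ∧ i ≤ rIdx s j) →
    stk.Pairwise (· > ·) →
    (∀ j ∈ stk, j < right.length) →
    (aPopR s i right stk).2 = stk.filter (fun j => decide (i + 1 ≤ rIdx s j)) ∧
    ∀ (j0 : Nat) (d : Int), (aPopR s i right stk).1.getD j0 d =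
      if j0 ∈ stk ∧ rIdx s j0 = i then Int.ofNat i else right.getD j0 d := by
  intro stk
  induction stk with
  | nil =>
    intro right _ _ _
    exact ⟨rfl, fun j0 d => by simp [aPopR]⟩
  | cons j st ih =>
    intro right hmem hpw hlen
    have hj := hmem j (List.mem_cons_self ..)
    have hiff := rIdx_eq_iff s i j hi hj.1 hj.2
    by_cases hc : s.getD j 0 > s.getD i 0
    · have hrj : rIdx s j = i := hiff.mp hc
      have hrec := ih (right.set j (Int.ofNat i))
        (fun j' hj' => hmem j' (List.mem_cons_of_mem _ hj'))
        (List.pairwise_cons.mp hpw).2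
        (fun j' hj' => by simpa using hlen j' (List.mem_cons_of_mem _ hj'))
      simp only [aPopR, if_pos hc]
      refine ⟨?_, ?_⟩
      · rw [hrec.1, List.filter_cons]
        have hni : ¬ (i + 1 ≤ rIdx s j) := by omega
        simp [hni]
      · intro j0 d
        rw [hrec.2 j0 d]
        by_cases h0 : j0 ∈ st ∧ rIdx s j0 = i
        · rw [if_pos h0, if_pos ⟨List.mem_cons_of_mem _ h0.1, h0.2⟩]
        · rw [if_neg h0]
          by_cases hj0 : j0 = j
          · subst hj0
            rw [getD_set_self _ _ _ _ (hlen j0 (List.mem_cons_self ..)),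
              if_pos ⟨List.mem_cons_self .., hrj⟩]
          · rw [getD_set_ne _ _ _ _ _ hj0]
            have hno : ¬ (j0 ∈ j :: st ∧ rIdx s j0 = i) := by
              rintro ⟨hm, hr⟩
              rcases List.mem_cons.mp hm with h | h
              · exact hj0 h
              · exact h0 ⟨h, hr⟩
            rw [if_neg hno]
    · have hrj : i + 1 ≤ rIdx s j := by
        rcases Nat.eq_or_lt_of_le hj.2 with h | h
        · exact absurd (hiff.mpr h.symm) hc
        · omega
      have hall : ∀ j' ∈ j :: st, i + 1 ≤ rIdx s j' := by
        intro j' hj'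
        rcases List.mem_cons.mp hj' with h | h
        · exact h ▸ hrj
        · have hj'' := hmem j' (List.mem_cons_of_mem _ h)
          have hlt : j' < j := (List.pairwise_cons.mp hpw).1 j' h
          have hvj : s.getD j' 0 ≤ s.getD j 0 :=
            bScanR_between s (s.getD j' 0) (j' + 1) j (by omega)
              (by have h3 := hj''.2; unfold rIdx at h3; omega)
          rcases Nat.eq_or_lt_of_le hj''.2 with h2 | h2
          · exfalso
            have := (rIdx_eq_iff s i j' hi hj''.1 hj''.2).mpr h2.symm
            omega
          · omega
      simp only [aPopR, if_neg hc]
      refine ⟨?_, fun j0 d => ?_⟩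
      · exact (List.filter_eq_self.mpr (fun a ha => decide_eq_true (hall a ha))).symm
      · have hno : ¬ (j0 ∈ j :: st ∧ rIdx s j0 = i) := by
          rintro ⟨hm, hr⟩
          have := hall j0 hm
          omega
        rw [if_neg hno]

def rpState (s : List Int) (k : Nat) : List Int × List Nat :=
  (List.range k).foldl
    (fun st i => let p := aPopR s i st.1 st.2; (p.1, i :: p.2))
    (List.replicate s.length (Int.ofNat s.length), [])

theorem rpState_inv (s : List Int) : ∀ (k : Nat), k ≤ s.length →
    (rpState s k).1.length = s.length ∧
    (∀ j, j < s.length → (rpState s k).1.getD j 0 =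
      if rIdx s j < k then Int.ofNat (rIdx s j) else Int.ofNat s.length) ∧
    (rpState s k).2.Pairwise (· > ·) ∧
    (∀ j, j ∈ (rpState s k).2 ↔ j < k ∧ k ≤ rIdx s j) := by
  intro k
  induction k with
  | zero =>
    intro _
    refine ⟨by simp [rpState], fun j hj => ?_, by simp [rpState], fun j => by simp [rpState]⟩
    simp [rpState, List.getD_eq_getElem?_getD, hj]
  | succ k ih =>
    intro hk
    have hk' : k ≤ s.length := Nat.le_of_succ_le hk
    obtain ⟨hL, hA, hP, hM⟩ := ih hk'
    have hstep : rpState s (k + 1) =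
        ((aPopR s k (rpState s k).1 (rpState s k).2).1,
          k :: (aPopR s k (rpState s k).1 (rpState s k).2).2) := by
      unfold rpState
      rw [List.range_succ, List.foldl_append]
      rfl
    have hpop := aPopR_spec s k (by omega) (rpState s k).2 (rpState s k).1
      (fun j hj => (hM j).mp hj)
      hP
      (fun j hj => by have := (hM j).mp hj; omega)
    refine ⟨?_, ?_, ?_, ?_⟩
    · rw [hstep]; simpa using (aPopR_length s k _ _).trans hL
    · intro j hj
      rw [hstep]
      simp only
      rw [hpop.2 j 0]
      by_cases hr : rIdx s j = k
      · have hjk : j < k := by have := rIdx_gt s j; omega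
        have hjm : j ∈ (rpState s k).2 := (hM j).mpr ⟨hjk, by omega⟩
        rw [if_pos ⟨hjm, hr⟩, if_pos (by omega), hr]
      · have hno : ¬ (j ∈ (rpState s k).2 ∧ rIdx s j = k) := fun h => hr h.2
        rw [if_neg hno, hA j hj]
        by_cases h2 : rIdx s j < k
        · rw [if_pos h2, if_pos (by omega)]
        · rw [if_neg h2, if_neg (by omega)]
    · rw [hstep]
      simp only
      rw [hpop.1]
      refine List.pairwise_cons.mpr ⟨?_, hP.filter _⟩
      intro a ha
      have := (hM a).mp (List.mem_of_mem_filter ha)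
      omega
    · intro j
      rw [hstep]
      simp only [List.mem_cons, hpop.1, List.mem_filter]
      constructor
      · rintro (h | ⟨hm, hd⟩)
        · subst h
          have := rIdx_gt s j
          omega
        · have := (hM j).mp hm
          have hd' := of_decide_eq_true hd
          omega
      · rintro ⟨h1, h2⟩
        by_cases hj : j = k
        · exact Or.inl hj
        · refine Or.inr ⟨(hM j).mpr ⟨by omega, by omega⟩, decide_eq_true (by omega)⟩

theorem aRightPass_getD (s : List Int) (i : Nat) (hi : i < s.length) :
    (aRightPass s).1.getD i 0 = Int.ofNat (rIdx s i) := by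
  have h : aRightPass s = rpState s s.length := rfl
  obtain ⟨_, hA, _, _⟩ := rpState_inv s s.length le_rfl
  rw [h, hA i hi]
  by_cases hr : rIdx s i < s.length
  · rw [if_pos hr]
  · rw [if_neg hr]
    have := rIdx_le s i hi
    have : rIdx s i = s.length := by omega
    rw [this]

theorem lIdx_lt (s : List Int) (j : Nat) : lIdx s j < (j : Int) := bScanL_lt s (s.getD j 0) j

theorem lIdx_ge (s : List Int) (j : Nat) : -1 ≤ lIdx s j := bScanL_ge s (s.getD j 0) j

theorem lIdx_eq_iff (s : List Int) (i j : Nat) (hj : i < j) (hge : lIdx s j ≤ (i : Int)) :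
    s.getD j 0 ≥ s.getD i 0 ↔ lIdx s j = (i : Int) := by
  constructor
  · intro h
    by_contra hne
    have hlt : lIdx s j < (i : Int) := lt_of_le_of_ne hge hne
    have := bScanL_between s (s.getD j 0) j i hj hlt
    omega
  · intro h
    have h0 : 0 ≤ lIdx s j := by omega
    have := bScanL_stop s (s.getD j 0) j h0
    unfold lIdx at h
    rw [h] at this
    simpa using this

theorem aPopL_length (s : List Int) (i : Nat) :
    ∀ (stk : List Nat) (left : List Int), (aPopL s i left stk).1.length = left.length := by
  intro stk
  induction stk with
  | nil => intro left; rfl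
  | cons j st ih =>
    intro left
    simp only [aPopL]
    split
    · rw [ih]; simp
    · rfl

theorem aPopL_spec (s : List Int) (i : Nat) :
    ∀ (stk : List Nat) (left : List Int),
    (∀ j ∈ stk, i < j ∧ j < s.length ∧ lIdx s j ≤ (i : Int)) →
    stk.Pairwise (· < ·) →
    (∀ j ∈ stk, j < left.length) →
    (aPopL s i left stk).2 = stk.filter (fun j => decide (lIdx s j < (i : Int))) ∧
    ∀ (j0 : Nat) (d : Int), (aPopL s i left stk).1.getD j0 d =
      if j0 ∈ stk ∧ lIdx s j0 = (i : Int) then Int.ofNat i else left.getD j0 d := by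
  intro stk
  induction stk with
  | nil =>
    intro left _ _ _
    exact ⟨rfl, fun j0 d => by simp [aPopL]⟩
  | cons j st ih =>
    intro left hmem hpw hlen
    have hj := hmem j (List.mem_cons_self ..)
    have hiff := lIdx_eq_iff s i j hj.1 hj.2.2
    by_cases hc : s.getD j 0 ≥ s.getD i 0
    · have hrj : lIdx s j = (i : Int) := hiff.mp hc
      have hrec := ih (left.set j (Int.ofNat i))
        (fun j' hj' => hmem j' (List.mem_cons_of_mem _ hj'))
        (List.pairwise_cons.mp hpw).2
        (fun j' hj' => by simpa using hlen j' (List.mem_cons_of_mem _ hj'))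
      simp only [aPopL, if_pos hc]
      refine ⟨?_, ?_⟩
      · rw [hrec.1, List.filter_cons]
        have hni : ¬ (lIdx s j < (i : Int)) := by omega
        simp [hni]
      · intro j0 d
        rw [hrec.2 j0 d]
        by_cases h0 : j0 ∈ st ∧ lIdx s j0 = (i : Int)
        · rw [if_pos h0, if_pos ⟨List.mem_cons_of_mem _ h0.1, h0.2⟩]
        · rw [if_neg h0]
          by_cases hj0 : j0 = j
          · subst hj0
            rw [getD_set_self _ _ _ _ (hlen j0 (List.mem_cons_self ..)),
              if_pos ⟨List.mem_cons_self .., hrj⟩]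
          · rw [getD_set_ne _ _ _ _ _ hj0]
            have hno : ¬ (j0 ∈ j :: st ∧ lIdx s j0 = (i : Int)) := by
              rintro ⟨hm, hr⟩
              rcases List.mem_cons.mp hm with h | h
              · exact hj0 h
              · exact h0 ⟨h, hr⟩
            rw [if_neg hno]
    · have hrj : lIdx s j < (i : Int) := by
        rcases lt_or_eq_of_le hj.2.2 with h | h
        · exact h
        · exact absurd (hiff.mpr h) hc
      have hall : ∀ j' ∈ j :: st, lIdx s j' < (i : Int) := by
        intro j' hj'
        rcases List.mem_cons.mp hj' with h | h
        · exact h ▸ hrj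
        · have hj'' := hmem j' (List.mem_cons_of_mem _ h)
          have hlt : j < j' := (List.pairwise_cons.mp hpw).1 j' h
          have hvj : s.getD j' 0 < s.getD j 0 :=
            bScanL_between s (s.getD j' 0) j' j hlt
              (by have h3 := hj''.2.2; unfold lIdx at h3; omega)
          rcases lt_or_eq_of_le hj''.2.2 with h2 | h2
          · exact h2
          · exfalso
            have := (lIdx_eq_iff s i j' hj''.1 hj''.2.2).mpr h2
            omega
      simp only [aPopL, if_neg hc]
      refine ⟨?_, fun j0 d => ?_⟩
      · exact (List.filter_eq_self.mpr (fun a ha => decide_eq_true (hall a ha))).symm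
      · have hno : ¬ (j0 ∈ j :: st ∧ lIdx s j0 = (i : Int)) := by
          rintro ⟨hm, hr⟩
          have := hall j0 hm
          omega
        rw [if_neg hno]

def lpState (s : List Int) (m : Nat) : List Int × List Nat :=
  ((List.range' (s.length - m) m).reverse).foldl
    (fun st i => let p := aPopL s i st.1 st.2; (p.1, i :: p.2))
    (List.replicate s.length (-1), [])

theorem lpState_inv (s : List Int) : ∀ (m : Nat), m ≤ s.length →
    (lpState s m).1.length = s.length ∧
    (∀ j, j < s.length → (lpState s m).1.getD j 0 =
      if ((s.length - m : Nat) : Int) ≤ lIdx s j then lIdx s j else -1) ∧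
    (lpState s m).2.Pairwise (· < ·) ∧
    (∀ j, j ∈ (lpState s m).2 ↔
      s.length - m ≤ j ∧ j < s.length ∧ lIdx s j < ((s.length - m : Nat) : Int)) := by
  intro m
  induction m with
  | zero =>
    intro _
    refine ⟨by simp [lpState], fun j hj => ?_, by simp [lpState], fun j => by simp [lpState]; omega⟩
    have h1 : lIdx s j < ((s.length - 0 : Nat) : Int) := by
      have := lIdx_lt s j; simp; omega
    rw [if_neg (by omega)]
    simp [lpState, List.getD_eq_getElem?_getD, hj]
  | succ m ih =>
    intro hm
    have hm' : m ≤ s.length := Nat.le_of_succ_le hm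
    obtain ⟨hL, hA, hP, hM⟩ := ih hm'
    set i := s.length - (m + 1) with hidef
    have hin : i < s.length := by omega
    have hi1 : i + 1 = s.length - m := by omega
    have hstep : lpState s (m + 1) =
        ((aPopL s i (lpState s m).1 (lpState s m).2).1,
          i :: (aPopL s i (lpState s m).1 (lpState s m).2).2) := by
      unfold lpState
      rw [show List.range' (s.length - (m + 1)) (m + 1) = i :: List.range' (s.length - m) m by
        rw [List.range'_succ, hidef, hi1]]
      rw [List.reverse_cons, List.foldl_append]
      rfl
    have hpop := aPopL_spec s i (lpState s m).2 (lpState s m).1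
      (fun j hj => by have := (hM j).mp hj; refine ⟨by omega, this.2.1, by omega⟩)
      hP
      (fun j hj => by have := (hM j).mp hj; omega)
    refine ⟨?_, ?_, ?_, ?_⟩
    · rw [hstep]; simpa using (aPopL_length s i _ _).trans hL
    · intro j hj
      rw [hstep]
      simp only
      rw [hpop.2 j 0]
      by_cases hr : lIdx s j = (i : Int)
      · have hij : i < j := by have := lIdx_lt s j; omega
        have hjm : j ∈ (lpState s m).2 := (hM j).mpr ⟨by omega, hj, by omega⟩
        rw [if_pos ⟨hjm, hr⟩, if_pos (by omega), hr]
        simp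
      · have hno : ¬ (j ∈ (lpState s m).2 ∧ lIdx s j = (i : Int)) := fun h => hr h.2
        rw [if_neg hno, hA j hj]
        by_cases h2 : ((s.length - m : Nat) : Int) ≤ lIdx s j
        · rw [if_pos h2, if_pos (by omega)]
        · rw [if_neg h2, if_neg (by omega)]
    · rw [hstep]
      simp only
      rw [hpop.1]
      refine List.pairwise_cons.mpr ⟨?_, hP.filter _⟩
      intro a ha
      have := (hM a).mp (List.mem_of_mem_filter ha)
      omega
    · intro j
      rw [hstep]
      simp only [List.mem_cons, hpop.1, List.mem_filter]
      constructor
      · rintro (h | ⟨hm2, hd⟩)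
        · have := lIdx_lt s i
          rw [h]
          exact ⟨by omega, hin, by omega⟩
        · have := (hM j).mp hm2
          have hd' := of_decide_eq_true hd
          refine ⟨by omega, this.2.1, by omega⟩
      · rintro ⟨h1, h2, h3⟩
        by_cases hj : j = i
        · exact Or.inl hj
        · refine Or.inr ⟨(hM j).mpr ⟨by omega, h2, by omega⟩, decide_eq_true (by omega)⟩

theorem aLeftPass_getD (s : List Int) (i : Nat) (hi : i < s.length) :
    (aLeftPass s).1.getD i 0 = lIdx s i := by
  have h : aLeftPass s = lpState s s.length := by
    unfold aLeftPass lpState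
    rw [List.range_eq_range', Nat.sub_self]
  obtain ⟨_, hA, _, _⟩ := lpState_inv s s.length le_rfl
  rw [h, hA i hi]
  by_cases h0 : 0 ≤ lIdx s i
  · rw [if_pos (by simpa using h0)]
  · rw [if_neg (by simp; omega)]
    have := lIdx_ge s i
    omega

-- ===== VERDICT (by name: the statement is the Claim_ definition above) =====
theorem totalStrength_spec : Claim_equal_totalStrength := by
  intro s _
  show totalStrength s = totalStrength_alt s
  unfold totalStrength totalStrength_alt
  simp only [aPrefix_eq, aPP_eq, bPP_eq]
  apply PySem.List.foldl_congr_mem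
  intro total i hi
  have hi' : i < s.length := List.mem_range.mp hi
  rw [aRightPass_getD s i hi', aLeftPass_getD s i hi']
  have h1 : ((Int.ofNat (rIdx s i) + 1).toNat) = rIdx s i + 1 := by simp
  rw [h1]
  simp only [rIdx, lIdx, Int.ofNat_eq_natCast]
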